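-- pv_equiv track=rewrite | github.com/SmithYorke/BEE-FUGE | from music21 import converter, note, cho.py | transpose_pitch
-- ===== SOURCE A (Python) =====
-- def transpose_pitch(pitch, semitones):
--     mapping = {}
--     midi = 36
--     for octave in range(2, 7):
--         for note in ["C", "C#", "D", "D#", "E", "F", "F#", "G", "G#", "A", "A#", "B"]:
--             key = f"{note}{octave}"
--             mapping[key] = midi
--             midi += 1
--     reverse = {v: k for k, v in mapping.items()}
--     return reverse.get(min(max(mapping.get(pitch, 60) + semitones, 36), 91), "C4")
-- ===== SOURCE B (Python) =====
-- NOTES = ["C", "C#", "D", "D#", "E", "F", "F#", "G", "G#", "A", "A#", "B"]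
--
--
-- def _name_to_midi(pitch):
--     # MIDI number of a recognised pitch name, 60 (middle C) otherwise.
--     try:
--         octave = pitch[-1]
--         if octave not in "23456":
--             return 60
--         return (int(octave) + 1) * 12 + NOTES.index(pitch[:-1])
--     except (ValueError, IndexError, TypeError):
--         return 60
--
--
-- def transpose_pitch(pitch, semitones):
--     v = min(max(_name_to_midi(pitch) + semitones, 36), 91)
--     return NOTES[v % 12] + str(v // 12 - 1)
-- ===== Notes on version B (the rewrite author's own statement) =====
-- stated objective: simpler
-- what changed: A builds a 60-entry name-to-MIDI dict plus its inverted dict and looks the pitch up in both; B computes the MIDI number directly from the parsed note name and octave digit and formats the clamped result back with % and // arithmetic, building no tables at all.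
import Mathlib
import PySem

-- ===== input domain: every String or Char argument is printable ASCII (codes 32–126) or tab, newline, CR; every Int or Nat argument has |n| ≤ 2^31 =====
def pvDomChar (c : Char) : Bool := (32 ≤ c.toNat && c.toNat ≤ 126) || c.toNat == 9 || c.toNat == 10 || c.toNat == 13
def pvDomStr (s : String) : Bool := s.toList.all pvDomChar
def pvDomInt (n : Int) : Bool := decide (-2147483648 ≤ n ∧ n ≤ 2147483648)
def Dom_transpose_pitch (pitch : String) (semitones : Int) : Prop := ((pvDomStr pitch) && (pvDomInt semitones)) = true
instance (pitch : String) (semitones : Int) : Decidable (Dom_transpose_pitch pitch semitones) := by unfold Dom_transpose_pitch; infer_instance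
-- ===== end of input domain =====

set_option maxRecDepth 100000

-- B replaces A's build-a-60-entry-table-then-invert-it approach by direct arithmetic both
-- ways (parse the pitch name into a MIDI number, format the MIDI number back); objective: simpler.

-- ===== PORT A =====
def transpose_pitch (pitch : String) (semitones : Int) : String :=
  let notes : List String := ["C", "C#", "D", "D#", "E", "F", "F#", "G", "G#", "A", "A#", "B"]
  let st : PySem.Dict String Int × Int :=
    (PySem.List.pyRange 2 7 1).foldl (fun st octave =>
      notes.foldl (fun st note =>
        let key := note ++ PySem.Int.toStr octave   -- f"{note}{octave}"
        (st.1.insert key st.2, st.2 + 1)) st)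
      (PySem.Dict.empty, 36)
  let mapping := st.1
  let reverse : PySem.Dict Int String :=
    mapping.items.foldl (fun d p => d.insert p.2 p.1) PySem.Dict.empty
  reverse.getD (min (max (mapping.getD pitch 60 + semitones) 36) 91) "C4"

-- ===== PORT B =====
def pvNotes : List String := ["C", "C#", "D", "D#", "E", "F", "F#", "G", "G#", "A", "A#", "B"]

-- port of Source B's _name_to_midi; each 'none => 60' branch is exactly the except-clause
def pvNameToMidi (pitch : String) : Int :=
  match PySem.Str.pyGet? pitch (-1) with              -- pitch[-1]; none = IndexError, caught
  | none => 60
  | some octave =>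
    if PySem.Str.isIn (String.ofList [octave]) "23456" = false then 60   -- octave not in "23456"
    else
      match PySem.Int.ofStr? (String.ofList [octave]) with               -- int(octave)
      | none => 60
      | some o =>
        match PySem.List.index? pvNotes (PySem.Str.slice pitch none (some (-1))) with  -- NOTES.index(pitch[:-1])
        | none => 60                                                     -- ValueError, caught
        | some i => (o + 1) * 12 + (i : Int)

def transpose_pitch_alt (pitch : String) (semitones : Int) : String :=
  let v := min (max (pvNameToMidi pitch + semitones) 36) 91
  -- NOTES[v % 12]: 0 ≤ v % 12 < 12 always, so the getD default is never taken
  ((PySem.List.pyGet? pvNotes (PySem.Int.mod v 12)).getD "") ++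
    PySem.Int.toStr (PySem.Int.floordiv v 12 - 1)

-- ===== PRECONDITION & SPEC =====
def Spec_transpose_pitch (pitch : String) (semitones : Int) (out : String) : Prop := out = transpose_pitch_alt pitch semitones
instance (pitch : String) (semitones : Int) (out : String) : Decidable (Spec_transpose_pitch pitch semitones out) := by unfold Spec_transpose_pitch; infer_instance

-- ===== CLAIM (what is proved, stated in full; the proofs are below) =====
def Claim_equal_transpose_pitch : Prop := ∀ (pitch : String) (semitones : Int), Dom_transpose_pitch pitch semitones → Spec_transpose_pitch pitch semitones (transpose_pitch pitch semitones)

-- ===== LEMMAS AND PROOFS =====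

-- the closed terms A's let-bound mapping and reverse evaluate to
def pvMappingA : PySem.Dict String Int :=
  ((PySem.List.pyRange 2 7 1).foldl (fun st octave =>
      (["C", "C#", "D", "D#", "E", "F", "F#", "G", "G#", "A", "A#", "B"] : List String).foldl
        (fun st note =>
          let key := note ++ PySem.Int.toStr octave
          (st.1.insert key st.2, st.2 + 1)) st)
      ((PySem.Dict.empty : PySem.Dict String Int), 36)).1

def pvReverseA : PySem.Dict Int String :=
  pvMappingA.items.foldl (fun d p => d.insert p.2 p.1) PySem.Dict.empty

def pvKeys : List String := ["C2", "C#2", "D2", "D#2", "E2", "F2", "F#2", "G2", "G#2", "A2", "A#2", "B2", "C3", "C#3", "D3", "D#3", "E3", "F3", "F#3", "G3", "G#3", "A3", "A#3", "B3", "C4", "C#4", "D4", "D#4", "E4", "F4", "F#4", "G4", "G#4", "A4", "A#4", "B4", "C5", "C#5", "D5", "D#5", "E5", "F5", "F#5", "G5", "G#5", "A5", "A#5", "B5", "C6", "C#6", "D6", "D#6", "E6", "F6", "F#6", "G6", "G#6", "A6", "A#6", "B6"]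

lemma pv_keys_eq : pvMappingA.keys = pvKeys := by decide

lemma pv_getD_default {pitch : String} (h : pitch ∉ pvKeys) : pvMappingA.getD pitch 60 = 60 := by
  apply PySem.Dict.getD_of_not_contains
  rw [PySem.Dict.contains_eq_decide_mem_keys, pv_keys_eq]
  simp [h]

lemma pv_mem_keys (name : String) (oc : Char) (hn : name ∈ pvNotes)
    (ho : oc ∈ ['2', '3', '4', '5', '6']) :
    String.ofList (name.toList ++ [oc]) ∈ pvKeys := by
  fin_cases hn <;> fin_cases ho <;> decide

lemma pv_nameToMidi_default {pitch : String} (h : pitch ∉ pvKeys) : pvNameToMidi pitch = 60 := by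
  unfold pvNameToMidi
  cases hlast : PySem.Str.pyGet? pitch (-1) with
  | none => rfl
  | some oc =>
    cases hb : PySem.Str.isIn (String.ofList [oc]) "23456" with
    | false => simp at hb; simp [hb]
    | true =>
      cases hof : PySem.Int.ofStr? (String.ofList [oc]) with
      | none => simp [hof]
      | some o =>
        cases hidx : PySem.List.index? pvNotes (PySem.Str.slice pitch none (some (-1))) with
        | none => simp [hof]
        | some i =>
          exfalso
          -- oc is one of '2'..'6'
          have hm : oc ∈ (String.ofList [oc]).toList := by simp
          have hoc_mem : oc ∈ ['2', '3', '4', '5', '6'] := by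
            simpa using ((PySem.Str.isIn_iff_infix (String.ofList [oc]) "23456").mp hb).subset hm
          -- pitch[:-1] is one of the twelve note names
          obtain ⟨pre, suf, hsplit, -, -⟩ := (PySem.List.index?_eq_some_iff _ _ _).mp hidx
          have hmem : PySem.Str.slice pitch none (some (-1)) ∈ pvNotes := by rw [hsplit]; simp
          -- reassemble pitch = name ++ last char, hence pitch ∈ pvKeys, contradiction
          have htoList : (PySem.Str.slice pitch none (some (-1))).toList = pitch.toList.dropLast :=
            PySem.Str.slice_to_neg_one pitch
          have hlast' : pitch.toList.getLast? = some oc := by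
            simpa [PySem.Str.pyGet?, PySem.List.pyGet?_neg_one] using hlast
          have hp : String.ofList ((PySem.Str.slice pitch none (some (-1))).toList ++ [oc]) = pitch := by
            rw [htoList, List.dropLast_append_getLast? oc hlast']
            exact String.ofList_toList
          exact h (hp ▸ pv_mem_keys _ oc hmem hoc_mem)

lemma pv_forward (pitch : String) : pvMappingA.getD pitch 60 = pvNameToMidi pitch := by
  by_cases hk : pitch ∈ pvKeys
  · fin_cases hk <;> decide
  · rw [pv_getD_default hk, pv_nameToMidi_default hk]

lemma pv_backward_fin : ∀ n : Fin 56,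
    pvReverseA.getD (36 + (n.val : Int)) "C4" =
      ((PySem.List.pyGet? pvNotes (PySem.Int.mod (36 + (n.val : Int)) 12)).getD "") ++
        PySem.Int.toStr (PySem.Int.floordiv (36 + (n.val : Int)) 12 - 1) := by decide

lemma pv_backward (v : Int) (h1 : 36 ≤ v) (h2 : v ≤ 91) :
    pvReverseA.getD v "C4" =
      ((PySem.List.pyGet? pvNotes (PySem.Int.mod v 12)).getD "") ++
        PySem.Int.toStr (PySem.Int.floordiv v 12 - 1) := by
  obtain ⟨k, hk, rfl⟩ : ∃ k : Nat, k < 56 ∧ v = 36 + (k : Int) :=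
    ⟨(v - 36).toNat, by omega, by omega⟩
  exact pv_backward_fin ⟨k, hk⟩

-- ===== VERDICT (by name: the statement is the Claim_ definition above) =====
theorem transpose_pitch_spec : Claim_equal_transpose_pitch := by
  intro pitch semitones _
  unfold Spec_transpose_pitch
  have hA : transpose_pitch pitch semitones
      = pvReverseA.getD (min (max (pvMappingA.getD pitch 60 + semitones) 36) 91) "C4" := rfl
  have hB : transpose_pitch_alt pitch semitones
      = ((PySem.List.pyGet? pvNotes
            (PySem.Int.mod (min (max (pvNameToMidi pitch + semitones) 36) 91) 12)).getD "") ++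
          PySem.Int.toStr
            (PySem.Int.floordiv (min (max (pvNameToMidi pitch + semitones) 36) 91) 12 - 1) := rfl
  rw [hA, hB, pv_forward]
  exact pv_backward _ (by omega) (by omega)
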